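-- pv_equiv track=rewrite | github.com/lb74195/zackfor1219 | api/index.py | gen_live_numbers
-- ===== SOURCE A (Python) =====
-- def gen_live_numbers(attendees_count: int) -> list[int]:
--     out: list[int] = []
--     x = 1
--     while len(out) < attendees_count:
--         if "4" not in str(x):
--             out.append(x)
--         x += 1
--     return out
-- ===== SOURCE B (Python) =====
-- def gen_live_numbers(attendees_count: int) -> list[int]:
--     def nth(i: int) -> int:
--         # i-th (1-based) positive integer with no digit 4: write i in base 9,
--         # map each digit d -> d if d < 4 else d + 1, read the result in base 10.
--         r, p = 0, 1
--         while i: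
--             i, d = divmod(i, 9)
--             r += (d if d < 4 else d + 1) * p
--             p *= 10
--         return r
--     return [nth(i) for i in range(1, attendees_count + 1)]
-- ===== Notes on version B (the rewrite author's own statement) =====
-- stated objective: alternative
-- what changed: Replaces the trial scan of all integers with a substring test on str(x) by a closed-form base-9 digit mapping that computes the i-th no-digit-4 number directly from its index.
import Mathlib
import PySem

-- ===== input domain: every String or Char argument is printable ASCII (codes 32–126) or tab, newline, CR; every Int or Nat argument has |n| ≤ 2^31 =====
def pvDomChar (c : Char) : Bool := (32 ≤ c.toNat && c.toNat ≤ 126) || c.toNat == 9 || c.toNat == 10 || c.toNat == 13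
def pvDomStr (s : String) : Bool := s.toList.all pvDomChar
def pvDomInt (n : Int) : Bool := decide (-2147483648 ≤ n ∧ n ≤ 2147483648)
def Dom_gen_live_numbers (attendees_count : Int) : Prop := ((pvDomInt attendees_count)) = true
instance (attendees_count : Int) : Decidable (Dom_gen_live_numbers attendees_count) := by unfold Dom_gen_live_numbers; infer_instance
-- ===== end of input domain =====

-- B replaces A's trial scan (test every integer's decimal string for '4') by a direct
-- base-9 digit mapping computing the i-th no-digit-4 number from its index (objective: alternative).

-- ===== PORT A =====
-- number of base-9 digits of n; used only to size the fuel of A's while-loop, which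
-- provably never runs out (the n-th no-4 number is < 10 ^ pvLen9 n)
def pvLen9 (n : Nat) : Nat :=
  if h : n = 0 then 0 else pvLen9 (n / 9) + 1
termination_by n
decreasing_by exact Nat.div_lt_self (Nat.pos_of_ne_zero h) (by omega)

-- the while-loop of A: while len(out) < attendees_count: if "4" not in str(x): out.append(x); x += 1
def pvLoopA : Nat → Int → List Int → Int → List Int
  | 0, _, out, _ => out
  | fuel + 1, x, out, n =>
    if (out.length : Int) < n then
      if PySem.Str.isIn "4" (PySem.Int.toStr x) then
        pvLoopA fuel (x + 1) out n
      else
        pvLoopA fuel (x + 1) (out ++ [x]) n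
    else out

def gen_live_numbers (attendees_count : Int) : List Int :=
  pvLoopA (10 ^ pvLen9 attendees_count.toNat) 1 [] attendees_count

-- ===== PORT B =====
def pvMapDigit (d : Int) : Int := if d < 4 then d else d + 1

-- the while-loop of nth in B: r, p accumulators; i, d = divmod(i, 9)
def pvNthLoop (i : Nat) (r p : Int) : Int :=
  if h : i = 0 then r
  else pvNthLoop (i / 9) (r + pvMapDigit ((i % 9 : Nat) : Int) * p) (p * 10)
termination_by i
decreasing_by exact Nat.div_lt_self (Nat.pos_of_ne_zero h) (by omega)

def gen_live_numbers_alt (attendees_count : Int) : List Int :=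
  (PySem.List.pyRange 1 (attendees_count + 1) 1).map (fun i => pvNthLoop i.toNat 0 1)

-- ===== PRECONDITION & SPEC =====
def Spec_gen_live_numbers (attendees_count : Int) (out : List Int) : Prop := out = gen_live_numbers_alt attendees_count
instance (attendees_count : Int) (out : List Int) : Decidable (Spec_gen_live_numbers attendees_count out) := by unfold Spec_gen_live_numbers; infer_instance

-- ===== CLAIM (what is proved, stated in full; the proofs are below) =====
def Claim_equal_gen_live_numbers : Prop := ∀ (attendees_count : Int), Dom_gen_live_numbers attendees_count → Spec_gen_live_numbers attendees_count (gen_live_numbers attendees_count)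

-- ===== LEMMAS AND PROOFS =====

-- the k-th (1-based) positive integer with no decimal digit 4 (proof-side closed form)
def pvNth (i : Nat) : Int :=
  if h : i = 0 then 0 else 10 * pvNth (i / 9) + pvMapDigit ((i % 9 : Nat) : Int)
termination_by i
decreasing_by exact Nat.div_lt_self (Nat.pos_of_ne_zero h) (by omega)

-- does n (written in decimal) contain the digit 4?
def pvHas4 (n : Nat) : Bool :=
  (n % 10 == 4) || (if h : n / 10 = 0 then false else pvHas4 (n / 10))
termination_by n
decreasing_by exact Nat.div_lt_self (by omega) (by omega)

-- inverse of pvNth on no-4 numbers: read decimal digits back in base 9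
def pvUm (d : Nat) : Nat := if d < 4 then d else d - 1

def pvG (y : Nat) : Nat :=
  if h : y = 0 then 0 else 9 * pvG (y / 10) + pvUm (y % 10)
termination_by y
decreasing_by exact Nat.div_lt_self (Nat.pos_of_ne_zero h) (by omega)

lemma pvHas4_def (n : Nat) :
    pvHas4 n = ((n % 10 == 4) || (if _h : n / 10 = 0 then false else pvHas4 (n / 10))) := by
  rw [pvHas4]

lemma pvNth_zero : pvNth 0 = 0 := by rw [pvNth]; simp

lemma pvNth_succ {i : Nat} (h : i ≠ 0) :
    pvNth i = 10 * pvNth (i / 9) + pvMapDigit ((i % 9 : Nat) : Int) := by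
  rw [pvNth]; simp [h]

lemma pvNthLoop_eq (i : Nat) : ∀ r p : Int, pvNthLoop i r p = r + pvNth i * p := by
  induction i using Nat.strong_induction_on with
  | _ i ih =>
    intro r p
    rw [pvNthLoop, pvNth]
    by_cases h : i = 0
    · simp [h]
    · simp only [h, dite_false]
      rw [ih (i / 9) (Nat.div_lt_self (Nat.pos_of_ne_zero h) (by omega))]
      ring

lemma pvMapDigit_mono {a b : Int} (hab : a < b) (_ha : 0 ≤ a) :
    pvMapDigit a < pvMapDigit b := by
  unfold pvMapDigit; split_ifs <;> omega

lemma pvMapDigit_bounds {d : Int} (h0 : 0 ≤ d) (h8 : d ≤ 8) :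
    0 ≤ pvMapDigit d ∧ pvMapDigit d ≤ 9 ∧ pvMapDigit d ≠ 4 := by
  unfold pvMapDigit; split_ifs <;> omega

lemma pvNth_nonneg (i : Nat) : 0 ≤ pvNth i := by
  induction i using Nat.strong_induction_on with
  | _ i ih =>
    rw [pvNth]
    by_cases h : i = 0
    · simp [h]
    · simp only [h, dite_false]
      have h1 := ih (i / 9) (Nat.div_lt_self (Nat.pos_of_ne_zero h) (by omega))
      have h2 := pvMapDigit_bounds (d := ((i % 9 : Nat) : Int)) (by positivity)
        (by exact_mod_cast Nat.le_of_lt_succ (Nat.mod_lt i (by omega)))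
      omega

lemma pvNth_lt : ∀ k j : Nat, j < k → pvNth j < pvNth k := by
  intro k
  induction k using Nat.strong_induction_on with
  | _ k ih =>
    intro j hjk
    have hk : k ≠ 0 := by omega
    rw [pvNth_succ hk]
    have hk9 : (k % 9 : Nat) ≤ 8 := Nat.le_of_lt_succ (Nat.mod_lt k (by omega))
    have hbk := pvMapDigit_bounds (d := ((k % 9 : Nat) : Int)) (by positivity) (by exact_mod_cast hk9)
    by_cases hj : j = 0
    · subst hj
      rw [pvNth_zero]
      have hq := pvNth_nonneg (k / 9)
      by_cases hq0 : k / 9 = 0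
      · have hkm : 1 ≤ k % 9 := by omega
        have h1 : (1 : Int) ≤ ((k % 9 : Nat) : Int) := by exact_mod_cast hkm
        have h2 : pvMapDigit 0 < pvMapDigit ((k % 9 : Nat) : Int) :=
          pvMapDigit_mono (by omega) le_rfl
        have h0 : pvMapDigit 0 = 0 := by norm_num [pvMapDigit]
        omega
      · have h3 : pvNth 0 < pvNth (k / 9) :=
          ih (k / 9) (Nat.div_lt_self (by omega) (by omega)) 0 (by omega)
        rw [pvNth_zero] at h3
        omega
    · rw [pvNth_succ hj]
      have hj9 : (j % 9 : Nat) ≤ 8 := Nat.le_of_lt_succ (Nat.mod_lt j (by omega))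
      have hbj := pvMapDigit_bounds (d := ((j % 9 : Nat) : Int)) (by positivity) (by exact_mod_cast hj9)
      have hdle : j / 9 ≤ k / 9 := Nat.div_le_div_right (le_of_lt hjk)
      rcases eq_or_lt_of_le hdle with hde | hdlt
      · have hdig : j % 9 < k % 9 := by omega
        have h4 := pvMapDigit_mono (a := ((j % 9 : Nat) : Int)) (b := ((k % 9 : Nat) : Int))
          (by exact_mod_cast hdig) (by positivity)
        rw [hde]
        omega
      · have h5 := ih (k / 9) (Nat.div_lt_self (by omega) (by omega)) (j / 9) hdlt
        omega

lemma pvNth_le {j k : Nat} (h : j ≤ k) : pvNth j ≤ pvNth k := by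
  rcases eq_or_lt_of_le h with rfl | h
  · exact le_rfl
  · exact le_of_lt (pvNth_lt k j h)

lemma pvNth_pos {k : Nat} (h : k ≠ 0) : 1 ≤ pvNth k := by
  have := pvNth_lt k 0 (by omega)
  rw [pvNth_zero] at this
  omega

lemma pvNth_no4 (k : Nat) : pvHas4 (pvNth k).toNat = false := by
  induction k using Nat.strong_induction_on with
  | _ k ih =>
    by_cases hk : k = 0
    · subst hk; rw [pvNth_zero]; rw [pvHas4]; simp
    · rw [pvNth_succ hk]
      have hq := pvNth_nonneg (k / 9)
      have hk9 : (k % 9 : Nat) ≤ 8 := Nat.le_of_lt_succ (Nat.mod_lt k (by omega))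
      have hb := pvMapDigit_bounds (d := ((k % 9 : Nat) : Int)) (by positivity) (by exact_mod_cast hk9)
      set d := pvMapDigit ((k % 9 : Nat) : Int) with hd
      set q := pvNth (k / 9) with hqdef
      have hm : (10 * q + d).toNat = 10 * q.toNat + d.toNat := by omega
      rw [pvHas4, hm]
      have hmod : (10 * q.toNat + d.toNat) % 10 = d.toNat := by omega
      have hdiv : (10 * q.toNat + d.toNat) / 10 = q.toNat := by omega
      rw [hmod, hdiv]
      have hne : (d.toNat == 4) = false := by
        have : d.toNat ≠ 4 := by omega
        simpa using this
      rw [hne]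
      by_cases hq0 : q.toNat = 0
      · simp [hq0]
      · simp only [hq0, dite_false, Bool.false_or]
        have := ih (k / 9) (Nat.div_lt_self (by omega) (by omega))
        rwa [← hqdef] at this

lemma pvUm_spec {d : Nat} (h10 : d < 10) (h4 : d ≠ 4) :
    pvUm d ≤ 8 ∧ pvMapDigit ((pvUm d : Nat) : Int) = (d : Int) := by
  interval_cases d <;> simp_all [pvUm, pvMapDigit]

lemma pvG_inverse : ∀ y : Nat, pvHas4 y = false → pvNth (pvG y) = (y : Int) := by
  intro y
  induction y using Nat.strong_induction_on with
  | _ y ih =>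
    intro hy
    by_cases h0 : y = 0
    · subst h0; rw [pvG]; simp [pvNth_zero]
    · rw [pvHas4] at hy
      simp only [Bool.or_eq_false_iff, beq_eq_false_iff_ne, ne_eq] at hy
      obtain ⟨hd4, hrest⟩ := hy
      have hm10 : y % 10 < 10 := Nat.mod_lt y (by omega)
      obtain ⟨hum8, humd⟩ := pvUm_spec hm10 hd4
      -- value of pvNth at the quotient's index
      have ha : pvNth (pvG (y / 10)) = ((y / 10 : Nat) : Int) := by
        by_cases hq : y / 10 = 0
        · rw [hq]; rw [pvG]; simp [pvNth_zero]
        · have : pvHas4 (y / 10) = false := by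
            simp only [hq, dite_false] at hrest; exact hrest
          exact ih (y / 10) (Nat.div_lt_self (by omega) (by omega)) this
      rw [pvG]
      simp only [h0, dite_false]
      set a := pvG (y / 10) with hadef
      set b := pvUm (y % 10) with hbdef
      by_cases hz : 9 * a + b = 0
      · -- then a = 0 and b = 0, forcing y = 0, contradiction
        exfalso
        have ha0 : a = 0 := by omega
        have hb0 : b = 0 := by omega
        have hyd : ((y / 10 : Nat) : Int) = 0 := by
          rw [← ha, ha0, pvNth_zero]
        have hq0 : y / 10 = 0 := by exact_mod_cast hyd
        have hmd0 : ((y % 10 : Nat) : Int) = 0 := by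
          rw [← humd, hb0]; simp [pvMapDigit]
        have : y % 10 = 0 := by exact_mod_cast hmd0
        omega
      · rw [pvNth_succ hz]
        have hdiv : (9 * a + b) / 9 = a := by omega
        have hmod : (9 * a + b) % 9 = b := by omega
        rw [hdiv, hmod, ha, humd]
        omega

lemma pvLen9_zero : pvLen9 0 = 0 := by rw [pvLen9]; simp

lemma pvNth_bound (k : Nat) : pvNth k < (10 : Int) ^ pvLen9 k := by
  induction k using Nat.strong_induction_on with
  | _ k ih =>
    by_cases hk : k = 0
    · subst hk; rw [pvNth_zero, pvLen9_zero]; norm_num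
    · rw [pvNth_succ hk, pvLen9]
      simp only [hk, dite_false]
      have hq := ih (k / 9) (Nat.div_lt_self (by omega) (by omega))
      have hk9 : (k % 9 : Nat) ≤ 8 := Nat.le_of_lt_succ (Nat.mod_lt k (by omega))
      have hb := pvMapDigit_bounds (d := ((k % 9 : Nat) : Int)) (by positivity) (by exact_mod_cast hk9)
      rw [pow_succ]
      have hqn := pvNth_nonneg (k / 9)
      nlinarith [hq, hb.1, hb.2.1]

-- the digit-4 test of A's loop, reduced to pvHas4
lemma pvDigitChar_eq_four {r : Nat} (h : r < 10) : (Nat.digitChar r = '4') ↔ r = 4 := by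
  interval_cases r <;> simp [Nat.digitChar]

lemma pvMem_toDigitsCore :
    ∀ (fuel n : Nat) (acc : List Char), n < fuel →
      ('4' ∈ Nat.toDigitsCore 10 fuel n acc ↔ (pvHas4 n = true ∨ '4' ∈ acc)) := by
  intro fuel
  induction fuel with
  | zero => intro n acc h; omega
  | succ f ihf =>
    intro n acc h
    simp only [Nat.toDigitsCore]
    by_cases hq : n / 10 = 0
    · rw [if_pos hq]
      rw [pvHas4_def]
      simp only [hq, dite_true]
      constructor
      · intro hm
        rcases List.mem_cons.mp hm with hm | hm
        · left
          have : n % 10 = 4 := (pvDigitChar_eq_four (Nat.mod_lt n (by omega))).mp hm.symm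
          simp [this]
        · right; exact hm
      · intro hm
        rcases hm with hm | hm
        · simp only [Bool.or_eq_true, beq_iff_eq] at hm
          rcases hm with hm | hm
          · exact List.mem_cons.mpr (Or.inl ((pvDigitChar_eq_four (Nat.mod_lt n (by omega))).mpr hm).symm)
          · simp at hm
        · exact List.mem_cons.mpr (Or.inr hm)
    · rw [if_neg hq]
      have hn10 : 10 ≤ n := by omega
      have hrec : n / 10 < f := by
        have := Nat.div_lt_self (show 0 < n by omega) (show 1 < 10 by omega)
        omega
      rw [ihf (n / 10) _ hrec]
      rw [pvHas4_def n]
      simp only [hq, dite_false, Bool.or_eq_true, beq_iff_eq, List.mem_cons]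
      have h4 : (Nat.digitChar (n % 10) = '4') ↔ n % 10 = 4 :=
        pvDigitChar_eq_four (Nat.mod_lt n (by omega))
      constructor
      · rintro (hh | hc | hc)
        · exact Or.inl (Or.inr hh)
        · exact Or.inl (Or.inl (h4.mp hc.symm))
        · exact Or.inr hc
      · rintro ((hh | hh) | hc)
        · exact Or.inr (Or.inl (h4.mpr hh).symm)
        · exact Or.inl hh
        · exact Or.inr (Or.inr hc)

lemma pvIsIn4 (x : Int) (hx : 1 ≤ x) :
    PySem.Str.isIn "4" (PySem.Int.toStr x) = pvHas4 x.toNat := by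
  have hmem : ('4' ∈ Nat.toDigits 10 x.toNat) ↔ pvHas4 x.toNat = true := by
    rw [Nat.toDigits]
    rw [pvMem_toDigitsCore (x.toNat + 1) x.toNat [] (by omega)]
    simp
  have hinf : ("4".toList <:+: (PySem.Int.toStr x).toList) ↔ pvHas4 x.toNat = true := by
    rw [PySem.Int.toList_toStr]
    have hneg : ¬ x < 0 := by omega
    simp only [PySem.Int.toChars, if_neg hneg]
    have hl : "4".toList = ['4'] := rfl
    rw [hl]
    constructor
    · intro h
      exact hmem.mp (List.singleton_sublist.mp h.sublist)
    · intro h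
      obtain ⟨s, t, hst⟩ := List.append_of_mem (hmem.mpr h)
      exact ⟨s, t, by simpa using hst.symm⟩
  cases h : pvHas4 x.toNat
  · rw [Bool.eq_false_iff]
    intro htr
    have h4t := hinf.mp ((PySem.Str.isIn_iff_infix "4" (PySem.Int.toStr x)).mp htr)
    rw [h] at h4t
    exact Bool.false_ne_true h4t
  · exact (PySem.Str.isIn_iff_infix "4" (PySem.Int.toStr x)).mpr (hinf.mpr h)

lemma pvLoopA_spec (m : Nat) :
    ∀ (fuel : Nat) (c : Nat) (x : Int),
      c ≤ m → pvNth c < x → x ≤ pvNth (c + 1) →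
      (pvNth m + 2 - x).toNat ≤ fuel →
      pvLoopA fuel x ((List.range' 1 c).map (fun k => pvNth k)) (m : Int)
        = (List.range' 1 m).map (fun k => pvNth k) := by
  intro fuel
  induction fuel with
  | zero =>
    intro c x hcm hlo hhi hfuel
    have hc : c = m := by
      by_contra hne
      have hclt : c < m := lt_of_le_of_ne hcm hne
      have h1 : pvNth (c + 1) ≤ pvNth m := pvNth_le (by omega)
      omega
    subst hc
    rfl
  | succ fuel ih =>
    intro c x hcm hlo hhi hfuel
    have hx1 : 1 ≤ x := by have := pvNth_nonneg c; omega
    simp only [pvLoopA, List.length_map, List.length_range']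
    by_cases hclt : c < m
    · rw [if_pos (by exact_mod_cast hclt)]
      rw [pvIsIn4 x hx1]
      cases h4 : pvHas4 x.toNat
      · -- x has no digit 4: x is exactly pvNth (c+1)
        simp only [Bool.false_eq_true, if_false]
        have hxn : ((x.toNat : Nat) : Int) = x := by omega
        have hg : pvNth (pvG x.toNat) = x := by rw [pvG_inverse x.toNat h4, hxn]
        have hgc : pvG x.toNat = c + 1 := by
          by_contra hne
          rcases Nat.lt_or_ge (pvG x.toNat) (c + 1) with hlt | hge
          · have : pvNth (pvG x.toNat) ≤ pvNth c := pvNth_le (by omega)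
            omega
          · have : pvNth (c + 1) < pvNth (pvG x.toNat) := pvNth_lt _ _ (by omega)
            omega
        have hxv : x = pvNth (c + 1) := by rw [← hgc, hg]
        have hout : ((List.range' 1 c).map (fun k => pvNth k)) ++ [x]
            = (List.range' 1 (c + 1)).map (fun k => pvNth k) := by
          rw [List.range'_concat, List.map_append]
          simp [hxv, Nat.add_comm]
        rw [hout]
        apply ih (c + 1) (x + 1) (by omega) (by omega)
        · have h6 : pvNth (c + 1) < pvNth (c + 1 + 1) := pvNth_lt _ _ (by omega)
          omega
        · omega
      · -- x contains a 4: skip it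
        simp only [if_true]
        have hxne : x ≠ pvNth (c + 1) := by
          intro he
          have := pvNth_no4 (c + 1)
          rw [← he] at this
          rw [this] at h4
          exact Bool.true_eq_false.mp h4.symm
        apply ih c (x + 1) hcm (by omega) (by omega) (by omega)
    · have hc : c = m := by omega
      subst hc
      rw [if_neg (by exact_mod_cast (by omega : ¬ (c < c)))]

lemma pvRange_cast (m : Nat) :
    PySem.List.pyRange 1 ((m : Int) + 1) 1 = (List.range' 1 m).map (fun k => Int.ofNat k) := by
  induction m with
  | zero => decide
  | succ m ih =>
    have h1 : ((m + 1 : Nat) : Int) + 1 = ((m : Int) + 1) + 1 := by push_cast; ring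
    rw [h1, PySem.List.pyRange_one_succ_right (by omega), ih, List.range'_concat, List.map_append]
    congr 1
    simp only [List.map_cons, List.map_nil, Int.ofNat_eq_natCast]
    congr 1
    push_cast
    ring

lemma pvAlt_eq (m : Nat) :
    gen_live_numbers_alt (m : Int) = (List.range' 1 m).map (fun k => pvNth k) := by
  unfold gen_live_numbers_alt
  rw [pvRange_cast, List.map_map]
  apply List.map_congr_left
  intro k _
  simp only [Function.comp_apply, Int.ofNat_eq_natCast, Int.toNat_natCast]
  rw [pvNthLoop_eq]
  ring

lemma pvMain (n : Int) : gen_live_numbers n = gen_live_numbers_alt n := by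
  by_cases hn : n ≤ 0
  · unfold gen_live_numbers gen_live_numbers_alt
    have ht : n.toNat = 0 := by omega
    rw [ht, pvLen9_zero]
    have h1 : pvLoopA (10 ^ 0) 1 [] n = [] := by
      simp only [pvLoopA, List.length_nil, Int.natCast_zero]
      rw [if_neg (by omega)]
    rw [h1]
    have h2 : PySem.List.pyRange 1 (n + 1) 1 = [] := by
      rw [List.eq_nil_iff_forall_not_mem]
      intro a ha
      have := PySem.List.mem_pyRange_one.mp ha
      omega
    rw [h2]
    rfl
  · set m := n.toNat with hm
    have hnm : n = (m : Int) := by omega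
    rw [hnm, pvAlt_eq]
    unfold gen_live_numbers
    rw [show ((m : Int)).toNat = m by omega]
    have hinit : ([] : List Int) = (List.range' 1 0).map (fun k => pvNth k) := rfl
    rw [hinit]
    apply pvLoopA_spec m _ 0 1 (by omega)
    · rw [pvNth_zero]; omega
    · exact pvNth_pos (by omega)
    · have hb := pvNth_bound m
      rw [show pvNth m + 2 - 1 = pvNth m + 1 by ring, Int.toNat_le]
      calc pvNth m + 1 ≤ (10 : Int) ^ pvLen9 m := by omega
        _ = ((10 ^ pvLen9 m : Nat) : Int) := by push_cast; ring

-- ===== VERDICT (by name: the statement is the Claim_ definition above) =====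
theorem gen_live_numbers_spec : Claim_equal_gen_live_numbers := by
  intro n _
  unfold Spec_gen_live_numbers
  exact pvMain n
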